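-- pv_equiv track=rewrite | github.com/Aider-AI/aider | aider/coders/navigator_coder.py | _generate_diff_snippet
-- ===== SOURCE A (Python) =====
-- def _generate_diff_snippet(original_content, start_index, replaced_len, replacement_text):
--     """Generate a git-style diff snippet for a simple text replacement."""
--     try:
--         lines = original_content.splitlines()
--         char_count = 0
--         start_line_idx = -1
--         start_char_idx_in_line = -1
--
--         # Find the line and character index where the change starts
--         for i, line in enumerate(lines):
--             line_len_with_newline = len(line) + 1 # Account for newline character
--             if char_count + line_len_with_newline > start_index:
--                 start_line_idx = i
--                 start_char_idx_in_line = start_index - char_count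
--                 break
--             char_count += line_len_with_newline
--
--         if start_line_idx == -1: return "[Diff generation error: start index out of bounds]"
--
--         # Determine the end line and character index
--         end_index = start_index + replaced_len
--         char_count = 0
--         end_line_idx = -1
--         end_char_idx_in_line = -1
--         for i, line in enumerate(lines):
--              line_len_with_newline = len(line) + 1
--              if char_count + line_len_with_newline > end_index:
--                  end_line_idx = i
--                  # End char index is relative to the start of *its* line
--                  end_char_idx_in_line = end_index - char_count
--                  break
--              char_count += line_len_with_newline
--         # If end_index is exactly at the end of the content
--         if end_line_idx == -1 and end_index == len(original_content):
--              end_line_idx = len(lines) - 1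
--              end_char_idx_in_line = len(lines[end_line_idx])
--
--         if end_line_idx == -1: return "[Diff generation error: end index out of bounds]"
--
--         # Get context lines
--         context = 3
--         diff_start_line = max(0, start_line_idx - context)
--         diff_end_line = min(len(lines) - 1, end_line_idx + context)
--
--         diff_lines = [f"@@ line ~{start_line_idx + 1} @@"]
--         for i in range(diff_start_line, diff_end_line + 1):
--             if i >= start_line_idx and i <= end_line_idx:
--                 # Line is part of the original replaced block
--                 diff_lines.append(f"- {lines[i]}")
--             else:
--                 # Context line
--                 diff_lines.append(f"  {lines[i]}")
--
--         # Construct the new lines based on the replacement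
--         prefix = lines[start_line_idx][:start_char_idx_in_line]
--         suffix = lines[end_line_idx][end_char_idx_in_line:]
--
--         # Combine prefix, replacement, and suffix, then split into lines
--         combined_new_content = prefix + replacement_text + suffix
--         new_content_lines = combined_new_content.splitlines()
--
--         # Add new lines to diff
--         for new_line in new_content_lines:
--              diff_lines.append(f"+ {new_line}")
--
--         return "\n".join(diff_lines)
--     except Exception as e:
--          return f"[Diff generation error: {e}]"
-- ===== SOURCE B (Python) =====
-- import bisect
--
-- def _generate_diff_snippet(original_content, start_index, replaced_len, replacement_text):
--     """Generate a git-style diff snippet for a simple text replacement."""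
--     lines = original_content.splitlines()
--     n = len(lines)
--     # cumulative character offsets: ends[i] = chars consumed through line i (each line counts len+1)
--     ends = []
--     total = 0
--     for line in lines:
--         total += len(line) + 1
--         ends.append(total)
--
--     start_line_idx = bisect.bisect_right(ends, start_index)
--     if start_line_idx >= n:
--         return "[Diff generation error: start index out of bounds]"
--     start_char = start_index - (ends[start_line_idx - 1] if start_line_idx > 0 else 0)
--
--     end_index = start_index + replaced_len
--     end_line_idx = bisect.bisect_right(ends, end_index)
--     if end_line_idx >= n:
--         if end_index == len(original_content):
--             end_line_idx = n - 1
--             end_char = len(lines[end_line_idx])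
--         else:
--             return "[Diff generation error: end index out of bounds]"
--     else:
--         end_char = end_index - (ends[end_line_idx - 1] if end_line_idx > 0 else 0)
--
--     lo = max(0, start_line_idx - 3)
--     hi = min(n - 1, end_line_idx + 3)
--     header = "@@ line ~%d @@" % (start_line_idx + 1)
--     body = [("- " if start_line_idx <= i <= end_line_idx else "  ") + lines[i]
--             for i in range(lo, hi + 1)]
--     new_lines = (lines[start_line_idx][:start_char] + replacement_text
--                  + lines[end_line_idx][end_char:]).splitlines()
--     return "\n".join([header] + body + ["+ " + l for l in new_lines])
-- ===== Notes on version B (the rewrite author's own statement) =====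
-- stated objective: idiomatic
-- what changed: B builds the cumulative line-offset list once and locates the start and end lines with bisect.bisect_right instead of A's two separate linear enumerate-and-break scans, and assembles the diff with comprehensions instead of append loops.
import Mathlib
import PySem

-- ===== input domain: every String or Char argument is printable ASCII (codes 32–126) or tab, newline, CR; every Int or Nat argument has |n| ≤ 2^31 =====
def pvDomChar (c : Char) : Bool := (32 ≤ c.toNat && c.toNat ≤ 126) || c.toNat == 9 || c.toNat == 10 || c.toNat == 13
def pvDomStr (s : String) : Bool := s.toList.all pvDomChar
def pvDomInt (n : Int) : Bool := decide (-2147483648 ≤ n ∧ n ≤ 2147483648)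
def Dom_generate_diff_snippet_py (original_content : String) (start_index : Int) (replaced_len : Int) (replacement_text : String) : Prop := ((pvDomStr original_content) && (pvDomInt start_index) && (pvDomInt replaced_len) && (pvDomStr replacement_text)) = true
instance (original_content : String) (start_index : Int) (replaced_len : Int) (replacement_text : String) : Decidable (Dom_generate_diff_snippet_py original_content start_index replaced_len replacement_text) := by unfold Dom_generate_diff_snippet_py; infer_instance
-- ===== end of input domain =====

-- B replaces A's two linear scans for the start/end line by one cumulative-offset
-- list queried with bisect (idiomatic); return values are proved equal on all inputs.

-- ===== PORT A =====
-- A's two identical `for i, line in enumerate(lines)`-with-break loops (same code twice in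
-- the Python), transcribed once: carries the running index i and char_count cc.
def pvA_scan (lines : List String) (i : Nat) (cc : Int) (target : Int) : Option (Nat × Int) :=
  match lines with
  | [] => none
  | l :: rest =>
    let w : Int := PySem.Str.len l + 1
    if cc + w > target then some (i, target - cc)
    else pvA_scan rest (i + 1) (cc + w) target

def generate_diff_snippet_py (original_content : String) (start_index : Int) (replaced_len : Int) (replacement_text : String) : String :=
  let lines := PySem.Str.splitlines original_content
  match pvA_scan lines 0 0 start_index with
  | none => "[Diff generation error: start index out of bounds]"
  | some (startLineIdx, startCharIdx) =>
    let endIndex := start_index + replaced_len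
    let res : Option (Nat × Int) :=
      match pvA_scan lines 0 0 endIndex with
      | some r => some r
      | none =>
        -- if end_index is exactly at the end of the content
        if endIndex = PySem.Str.len original_content then
          some (lines.length - 1, PySem.Str.len (PySem.List.pyGetD lines ((lines.length : Int) - 1) ""))
        else none
    match res with
    | none => "[Diff generation error: end index out of bounds]"
    | some (endLineIdx, endCharIdx) =>
      let context : Int := 3
      let diffStart : Int := max 0 ((startLineIdx : Int) - context)
      let diffEnd : Int := min ((lines.length : Int) - 1) ((endLineIdx : Int) + context)
      let diffLines : List String := ["@@ line ~" ++ PySem.Int.toStr ((startLineIdx : Int) + 1) ++ " @@"]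
      let diffLines := (PySem.List.pyRange diffStart (diffEnd + 1) 1).foldl
        (fun acc i =>
          if (startLineIdx : Int) ≤ i ∧ i ≤ (endLineIdx : Int) then
            acc ++ ["- " ++ PySem.List.pyGetD lines i ""]
          else
            acc ++ ["  " ++ PySem.List.pyGetD lines i ""]) diffLines
      let pre := PySem.Str.slice (PySem.List.pyGetD lines (startLineIdx : Int) "") none (some startCharIdx)
      let suf := PySem.Str.slice (PySem.List.pyGetD lines (endLineIdx : Int) "") (some endCharIdx) none
      let newLines := PySem.Str.splitlines (pre ++ replacement_text ++ suf)
      let diffLines := newLines.foldl (fun acc nl => acc ++ ["+ " ++ nl]) diffLines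
      PySem.Str.join "\n" diffLines

-- ===== PORT B =====
-- the `total`/`ends.append` accumulation loop of Source B
def pvB_ends (lines : List String) : List Int :=
  (lines.foldl (fun (p : List Int × Int) l =>
    let t := p.2 + PySem.Str.len l + 1
    (p.1 ++ [t], t)) ([], 0)).1

def generate_diff_snippet_py_alt (original_content : String) (start_index : Int) (replaced_len : Int) (replacement_text : String) : String :=
  let lines := PySem.Str.splitlines original_content
  let n := lines.length
  let ends := pvB_ends lines
  let sIdx := PySem.List.bisectRight ends start_index
  if n ≤ sIdx then "[Diff generation error: start index out of bounds]"
  else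
    let sChar := start_index - (if 0 < sIdx then PySem.List.pyGetD ends ((sIdx : Int) - 1) 0 else 0)
    let endIndex := start_index + replaced_len
    let eBis := PySem.List.bisectRight ends endIndex
    let res : Option (Nat × Int) :=
      if n ≤ eBis then
        if endIndex = PySem.Str.len original_content then
          some (n - 1, PySem.Str.len (PySem.List.pyGetD lines ((n : Int) - 1) ""))
        else none
      else
        some (eBis, endIndex - (if 0 < eBis then PySem.List.pyGetD ends ((eBis : Int) - 1) 0 else 0))
    match res with
    | none => "[Diff generation error: end index out of bounds]"
    | some (eIdx, eChar) =>
      let lo : Int := max 0 ((sIdx : Int) - 3)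
      let hi : Int := min ((n : Int) - 1) ((eIdx : Int) + 3)
      let header := "@@ line ~" ++ PySem.Int.toStr ((sIdx : Int) + 1) ++ " @@"
      let body := (PySem.List.pyRange lo (hi + 1) 1).map
        (fun i => (if (sIdx : Int) ≤ i ∧ i ≤ (eIdx : Int) then "- " else "  ") ++ PySem.List.pyGetD lines i "")
      let newLines := PySem.Str.splitlines
        (PySem.Str.slice (PySem.List.pyGetD lines (sIdx : Int) "") none (some sChar) ++ replacement_text
          ++ PySem.Str.slice (PySem.List.pyGetD lines (eIdx : Int) "") (some eChar) none)
      PySem.Str.join "\n" ([header] ++ body ++ newLines.map (fun l => "+ " ++ l))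

-- ===== PRECONDITION & SPEC =====
def Spec_generate_diff_snippet_py (original_content : String) (start_index : Int) (replaced_len : Int) (replacement_text : String) (out : String) : Prop := out = generate_diff_snippet_py_alt original_content start_index replaced_len replacement_text
instance (original_content : String) (start_index : Int) (replaced_len : Int) (replacement_text : String) (out : String) : Decidable (Spec_generate_diff_snippet_py original_content start_index replaced_len replacement_text out) := by unfold Spec_generate_diff_snippet_py; infer_instance

-- ===== CLAIM (what is proved, stated in full; the proofs are below) =====
def Claim_equal_generate_diff_snippet_py : Prop := ∀ (original_content : String) (start_index : Int) (replaced_len : Int) (replacement_text : String), Dom_generate_diff_snippet_py original_content start_index replaced_len replacement_text → Spec_generate_diff_snippet_py original_content start_index replaced_len replacement_text (generate_diff_snippet_py original_content start_index replaced_len replacement_text)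

-- ===== LEMMAS AND PROOFS =====

-- cumulative offsets in closed recursive form
def pvEcum (lines : List String) (cc : Int) : List Int :=
  match lines with
  | [] => []
  | l :: rest => (cc + (PySem.Str.len l + 1)) :: pvEcum rest (cc + (PySem.Str.len l + 1))

theorem pvEcum_length (lines : List String) (cc : Int) : (pvEcum lines cc).length = lines.length := by
  induction lines generalizing cc with
  | nil => rfl
  | cons l rest ih => simp [pvEcum, ih]

theorem pvB_ends_foldl (lines : List String) (acc : List Int) (cc : Int) :
    (lines.foldl (fun (p : List Int × Int) l =>
      let t := p.2 + PySem.Str.len l + 1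
      (p.1 ++ [t], t)) (acc, cc)).1 = acc ++ pvEcum lines cc := by
  induction lines generalizing acc cc with
  | nil => simp [pvEcum]
  | cons l rest ih =>
    simp only [pvEcum, List.foldl_cons]
    rw [ih]
    simp [add_assoc]

theorem pvB_ends_eq (lines : List String) : pvB_ends lines = pvEcum lines 0 := by
  simpa using pvB_ends_foldl lines [] 0

theorem pvEcum_gt (lines : List String) (cc : Int) : ∀ e ∈ pvEcum lines cc, cc < e := by
  induction lines generalizing cc with
  | nil => simp [pvEcum]
  | cons l rest ih =>
    intro e he
    simp only [pvEcum, List.mem_cons] at he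
    have hnn : (0:Int) ≤ PySem.Str.len l := by simp [PySem.Str.len_eq]
    rcases he with h | h
    · omega
    · have := ih (cc + (PySem.Str.len l + 1)) e h
      omega

theorem pvEcum_sorted (lines : List String) (cc : Int) :
    List.Pairwise (fun a b => a ≤ b) (pvEcum lines cc) := by
  induction lines generalizing cc with
  | nil => simp [pvEcum]
  | cons l rest ih =>
    refine List.Pairwise.cons ?_ (ih _)
    intro e he
    have := pvEcum_gt rest (cc + (PySem.Str.len l + 1)) e he
    omega

theorem pvA_scan_shift (lines : List String) (i : Nat) (cc t : Int) :
    pvA_scan lines i cc t = (pvA_scan lines 0 cc t).map (fun p => (p.1 + i, p.2)) := by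
  induction lines generalizing i cc with
  | nil => simp [pvA_scan]
  | cons l rest ih =>
    simp only [pvA_scan]
    split
    · simp
    · rw [ih (i + 1), ih 1]
      cases pvA_scan rest 0 (cc + (PySem.Str.len l + 1)) t with
      | none => simp
      | some p => simp; omega

-- characterisation of A's scan loop against the cumulative offsets
theorem pvA_scan_none_iff (lines : List String) (cc t : Int) :
    pvA_scan lines 0 cc t = none ↔ ∀ e ∈ pvEcum lines cc, e ≤ t := by
  induction lines generalizing cc with
  | nil => simp [pvA_scan, pvEcum]
  | cons l rest ih =>
    simp only [pvA_scan, pvEcum]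
    split
    · rename_i hgt
      refine iff_of_false (by simp) ?_
      intro hall
      have := hall _ (List.mem_cons_self)
      omega
    · rename_i hle
      rw [pvA_scan_shift, Option.map_eq_none_iff, ih]
      constructor
      · intro hall e he
        simp only [List.mem_cons] at he
        rcases he with h | h
        · omega
        · exact hall e (by simpa using h)
      · intro hall e he
        exact hall e (List.mem_cons_of_mem _ he)

theorem pvA_scan_some (lines : List String) (cc t : Int) (j : Nat) (c : Int)
    (h : pvA_scan lines 0 cc t = some (j, c)) :
    ∃ hj : j < (pvEcum lines cc).length,
      t < (pvEcum lines cc)[j] ∧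
      (∀ k (hk : k < (pvEcum lines cc).length), k < j → (pvEcum lines cc)[k] ≤ t) ∧
      c = t - (if hp : 0 < j then (pvEcum lines cc)[j-1]'(by omega) else cc) := by
  induction lines generalizing cc j c with
  | nil => simp [pvA_scan] at h
  | cons l rest ih =>
    rw [show pvA_scan (l :: rest) 0 cc t
        = if cc + (PySem.Str.len l + 1) > t then some (0, t - cc)
          else pvA_scan rest 1 (cc + (PySem.Str.len l + 1)) t from rfl] at h
    by_cases hgt : cc + (PySem.Str.len l + 1) > t
    · rw [if_pos hgt] at h
      obtain ⟨hj, hc⟩ : 0 = j ∧ t - cc = c := by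
        simpa using h
      subst hj; subst hc
      refine ⟨by simp [pvEcum, pvEcum_length], ?_, ?_, ?_⟩
      · simpa [pvEcum] using hgt
      · intro k hk hk0; omega
      · simp
    · rw [if_neg hgt, pvA_scan_shift, Option.map_eq_some_iff] at h
      obtain ⟨⟨j', c'⟩, hscan, heq⟩ := h
      simp only [Prod.mk.injEq] at heq
      obtain ⟨hj', hc'⟩ := heq
      subst hj'
      subst hc'
      obtain ⟨hlt, hEj, hkle, hcval⟩ := ih (cc + (PySem.Str.len l + 1)) j' c' hscan
      have hlen : (pvEcum (l :: rest) cc).length = rest.length + 1 := by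
        simp [pvEcum, pvEcum_length]
      have hlen' : (pvEcum rest (cc + (PySem.Str.len l + 1))).length = rest.length := by
        simp [pvEcum_length]
      refine ⟨by simp [pvEcum, pvEcum_length]; omega, ?_, ?_, ?_⟩
      · show t < ((cc + (PySem.Str.len l + 1)) :: pvEcum rest (cc + (PySem.Str.len l + 1)))[j' + 1]'(by simp [pvEcum_length]; omega)
        simpa using hEj
      · intro k hk hkj
        show ((cc + (PySem.Str.len l + 1)) :: pvEcum rest (cc + (PySem.Str.len l + 1)))[k]'(by
          simpa [pvEcum, pvEcum_length] using hk) ≤ t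
        match k with
        | 0 => simpa using (by omega : cc + (PySem.Str.len l + 1) ≤ t)
        | k + 1 =>
          have := hkle k (by omega) (by omega)
          simpa using this
      · rw [hcval]
        congr 1
        by_cases h0 : 0 < j'
        · rw [dif_pos h0, dif_pos (by omega : 0 < j' + 1)]
          show (pvEcum rest (cc + (PySem.Str.len l + 1)))[j' - 1] =
            ((cc + (PySem.Str.len l + 1)) :: pvEcum rest (cc + (PySem.Str.len l + 1)))[j' + 1 - 1]'(by
              simp [pvEcum_length]; omega)
          have : j' + 1 - 1 = (j' - 1) + 1 := by omega
          simp [this]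
        · rw [dif_neg h0, dif_pos (by omega : 0 < j' + 1)]
          have hj0 : j' = 0 := by omega
          subst hj0
          simp [pvEcum]

-- A's scan = bisect on the cumulative offsets
theorem pvA_scan_eq_bisect (lines : List String) (t : Int) :
    pvA_scan lines 0 0 t =
      (if h : PySem.List.bisectRight (pvEcum lines 0) t < lines.length then
        some (PySem.List.bisectRight (pvEcum lines 0) t,
          t - (if hp : 0 < PySem.List.bisectRight (pvEcum lines 0) t then
            (pvEcum lines 0)[PySem.List.bisectRight (pvEcum lines 0) t - 1]'(by rw [pvEcum_length]; omega) else 0))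
      else none) := by
  obtain ⟨hble, hlo, hhi⟩ := PySem.List.bisectRight_spec (pvEcum lines 0) t (pvEcum_sorted lines 0)
  have hlen : (pvEcum lines 0).length = lines.length := pvEcum_length lines 0
  cases hscan : pvA_scan lines 0 0 t with
  | none =>
    have hall := (pvA_scan_none_iff lines 0 t).mp hscan
    rw [dif_neg]
    intro hblt
    have hblt' : PySem.List.bisectRight (pvEcum lines 0) t < (pvEcum lines 0).length := by omega
    have h1 := hhi _ hblt' (le_refl _)
    have h2 := hall _ (List.getElem_mem hblt')
    omega
  | some jc =>
    obtain ⟨j, c⟩ := jc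
    obtain ⟨hj, hEj, hkle, hc⟩ := pvA_scan_some lines 0 t j c hscan
    have hbj : PySem.List.bisectRight (pvEcum lines 0) t = j := by
      by_contra hne
      rcases Nat.lt_or_ge (PySem.List.bisectRight (pvEcum lines 0) t) j with hlt | hge
      · have h1 := hhi _ (by omega) (le_refl _)
        have h2 := hkle _ (by omega) hlt
        omega
      · have hjb : j < PySem.List.bisectRight (pvEcum lines 0) t := by omega
        have h1 := hlo j hj hjb
        omega
    rw [dif_pos (by omega : PySem.List.bisectRight (pvEcum lines 0) t < lines.length)]
    refine congrArg some (Prod.ext ?_ ?_)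
    · simpa using hbj.symm
    · show c = t - _
      rw [hc]
      congr 1
      by_cases h0 : 0 < j
      · rw [dif_pos h0, dif_pos (by omega)]
        congr 1
        omega
      · rw [dif_neg h0, dif_neg (by omega)]

-- loop-shape: fold-with-append is map
theorem pv_foldl_append_if (xs : List Int) (init : List String) (P : Int → Prop)
    [DecidablePred P] (f g : Int → String) :
    xs.foldl (fun acc i => if P i then acc ++ [f i] else acc ++ [g i]) init
      = init ++ xs.map (fun i => if P i then f i else g i) := by
  induction xs generalizing init with
  | nil => simp
  | cons x xs ih =>
    simp only [List.foldl_cons, List.map_cons]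
    by_cases hx : P x
    · rw [if_pos hx, ih, if_pos hx]
      simp
    · rw [if_neg hx, ih, if_neg hx]
      simp

theorem pv_ite_append (c : Prop) [Decidable c] (s : String) :
    (if c then "- " ++ s else "  " ++ s) = (if c then "- " else "  ") ++ s := by
  split <;> rfl

theorem pv_prev_eq (E : List Int) (j : Nat) (hj : j < E.length) :
    (if hp : 0 < j then E[j-1]'(by omega) else 0)
      = (if 0 < j then PySem.List.pyGetD E ((j : Int) - 1) 0 else 0) := by
  by_cases h0 : 0 < j
  · rw [dif_pos h0, if_pos h0]
    have hcast : ((j : Int) - 1) = ((j - 1 : Nat) : Int) := by omega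
    rw [hcast, PySem.List.pyGetD_natCast, List.getD_eq_getElem?_getD,
      List.getElem?_eq_getElem (by omega)]
    rfl
  · rw [dif_neg h0, if_neg h0]

theorem pv_flat (ys : List String) :
    (List.map (fun x2 => ["+ " ++ x2]) ys).flatten = List.map (fun l => "+ " ++ l) ys := by
  induction ys with
  | nil => rfl
  | cons y ys ih => simp [ih]

-- ===== VERDICT (by name: the statement is the Claim_ definition above) =====
theorem generate_diff_snippet_py_spec : Claim_equal_generate_diff_snippet_py := by
  intro oc si rl rt _
  unfold Spec_generate_diff_snippet_py
  simp only [generate_diff_snippet_py, generate_diff_snippet_py_alt]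
  rw [pvB_ends_eq]
  rw [pvA_scan_eq_bisect, pvA_scan_eq_bisect]
  have hElen : (pvEcum (PySem.Str.splitlines oc) 0).length = (PySem.Str.splitlines oc).length :=
    pvEcum_length _ 0
  by_cases h1 : PySem.List.bisectRight (pvEcum (PySem.Str.splitlines oc) 0) si < (PySem.Str.splitlines oc).length
  · rw [dif_pos h1,
      if_neg (show ¬ (PySem.Str.splitlines oc).length ≤ PySem.List.bisectRight (pvEcum (PySem.Str.splitlines oc) 0) si by omega)]
    rw [pv_prev_eq _ _ (show PySem.List.bisectRight (pvEcum (PySem.Str.splitlines oc) 0) si < (pvEcum (PySem.Str.splitlines oc) 0).length by omega)]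
    by_cases h2 : PySem.List.bisectRight (pvEcum (PySem.Str.splitlines oc) 0) (si + rl) < (PySem.Str.splitlines oc).length
    · rw [dif_pos h2,
        if_neg (show ¬ (PySem.Str.splitlines oc).length ≤ PySem.List.bisectRight (pvEcum (PySem.Str.splitlines oc) 0) (si + rl) by omega)]
      rw [pv_prev_eq _ _ (show PySem.List.bisectRight (pvEcum (PySem.Str.splitlines oc) 0) (si + rl) < (pvEcum (PySem.Str.splitlines oc) 0).length by omega)]
      simp [pv_foldl_append_if, pv_ite_append, pv_flat]
    · rw [dif_neg h2,
        if_pos (show (PySem.Str.splitlines oc).length ≤ PySem.List.bisectRight (pvEcum (PySem.Str.splitlines oc) 0) (si + rl) by omega)]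
      by_cases h3 : si + rl = PySem.Str.len oc
      · rw [if_pos h3]
        simp [pv_foldl_append_if, pv_ite_append, pv_flat]
      · rw [if_neg h3]
  · rw [dif_neg h1,
      if_pos (show (PySem.Str.splitlines oc).length ≤ PySem.List.bisectRight (pvEcum (PySem.Str.splitlines oc) 0) si by omega)]
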